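-- pv_equiv track=rewrite | github.com/unRekable/SqueezeFlow-Trader | data/loaders/symbol_discovery.py | _matches_base_symbol
-- ===== SOURCE A (Python) =====
-- def _matches_base_symbol(oi_symbol: str, base_symbol: str) -> bool:
--     """Check if OI symbol matches the base symbol"""
--     oi_upper = oi_symbol.upper()
--     base_upper = base_symbol.upper()
--
--     # Direct match
--     if oi_upper == base_upper:
--         return True
--
--     # Common OI symbol patterns
--     patterns = [
--         f"{base_upper}USD",      # BTCUSD
--         f"{base_upper}USDT",     # BTCUSDT
--         f"{base_upper}USDC",     # BTCUSDC
--         f"{base_upper}-USD",     # BTC-USD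
--         f"{base_upper}-USDT",    # BTC-USDT
--         f"{base_upper}-USDC",    # BTC-USDC
--         f"{base_upper}_USD",     # BTC_USD
--         f"{base_upper}_USDT",    # BTC_USDT
--         f"{base_upper}_USDC",    # BTC_USDC
--         f"{base_upper}-PERP",    # BTC-PERP
--         f"{base_upper}_PERP",    # BTC_PERP
--         f"{base_upper}PERP",     # BTCPERP
--         f"XBT" if base_upper == "BTC" else f"{base_upper}",  # Kraken XBT
--     ]
--
--     # Check if OI symbol matches any pattern
--     for pattern in patterns:
--         if oi_upper == pattern or oi_upper.startswith(pattern):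
--             return True
--
--     return False
-- ===== SOURCE B (Python) =====
-- _BTC_PREFIXES = ("BTCUSD", "BTC-USD", "BTC_USD", "BTC-PERP", "BTC_PERP", "BTCPERP", "XBT")
--
-- def _matches_base_symbol(oi_symbol: str, base_symbol: str) -> bool:
--     """Check if OI symbol matches the base symbol"""
--     oi_upper = oi_symbol.upper()
--     base_upper = base_symbol.upper()
--     if base_upper != "BTC":
--         # every pattern (and the direct match) begins with base_upper,
--         # and base_upper itself is one of the patterns
--         return oi_upper.startswith(base_upper)
--     return oi_upper == "BTC" or oi_upper.startswith(_BTC_PREFIXES)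
-- ===== Notes on version B (the rewrite author's own statement) =====
-- stated objective: simpler
-- what changed: A's direct-match check plus a scan over 13 per-call f-string patterns is replaced by a single startswith(base_upper) for every base other than BTC (all patterns, and the direct match, begin with base_upper, which is itself the last pattern), with BTC handled by one equality test and a startswith over a constant 7-prefix tuple.
import Mathlib
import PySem

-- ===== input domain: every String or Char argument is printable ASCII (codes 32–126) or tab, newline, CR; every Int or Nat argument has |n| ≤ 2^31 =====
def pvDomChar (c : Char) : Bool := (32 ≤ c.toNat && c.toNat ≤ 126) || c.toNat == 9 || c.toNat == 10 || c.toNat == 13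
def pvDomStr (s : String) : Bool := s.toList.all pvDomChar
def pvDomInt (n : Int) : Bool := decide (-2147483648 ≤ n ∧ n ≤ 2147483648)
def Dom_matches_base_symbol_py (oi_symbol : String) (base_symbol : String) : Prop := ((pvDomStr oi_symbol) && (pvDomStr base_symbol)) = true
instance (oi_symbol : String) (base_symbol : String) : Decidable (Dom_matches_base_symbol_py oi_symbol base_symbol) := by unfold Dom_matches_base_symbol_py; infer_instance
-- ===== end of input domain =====

-- B replaces A's 13-pattern scan by a single startswith(base) for non-BTC bases plus a small BTC special case (objective: simpler).


-- ===== PORT A =====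
def matches_base_symbol_py (oi_symbol : String) (base_symbol : String) : Bool :=
  let oi_upper := PySem.Str.upper oi_symbol
  let base_upper := PySem.Str.upper base_symbol
  -- Direct match
  if oi_upper == base_upper then true
  else
    -- Common OI symbol patterns
    let patterns : List String :=
      [ base_upper ++ "USD", base_upper ++ "USDT", base_upper ++ "USDC",
        base_upper ++ "-USD", base_upper ++ "-USDT", base_upper ++ "-USDC",
        base_upper ++ "_USD", base_upper ++ "_USDT", base_upper ++ "_USDC",
        base_upper ++ "-PERP", base_upper ++ "_PERP", base_upper ++ "PERP",
        if base_upper == "BTC" then "XBT" else base_upper ]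
    -- Check if OI symbol matches any pattern (early-return loop = List.any)
    patterns.any (fun pattern => oi_upper == pattern || PySem.Str.startswith oi_upper pattern)

-- ===== PORT B =====
def pvBtcPrefixes : List String :=
  ["BTCUSD", "BTC-USD", "BTC_USD", "BTC-PERP", "BTC_PERP", "BTCPERP", "XBT"]

def matches_base_symbol_py_alt (oi_symbol : String) (base_symbol : String) : Bool :=
  let oi_upper := PySem.Str.upper oi_symbol
  let base_upper := PySem.Str.upper base_symbol
  if base_upper != "BTC" then
    PySem.Str.startswith oi_upper base_upper
  else
    oi_upper == "BTC" || pvBtcPrefixes.any (fun p => PySem.Str.startswith oi_upper p)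

-- ===== PRECONDITION & SPEC =====
def Spec_matches_base_symbol_py (oi_symbol : String) (base_symbol : String) (out : Bool) : Prop := out = matches_base_symbol_py_alt oi_symbol base_symbol
instance (oi_symbol : String) (base_symbol : String) (out : Bool) : Decidable (Spec_matches_base_symbol_py oi_symbol base_symbol out) := by unfold Spec_matches_base_symbol_py; infer_instance

-- ===== CLAIM (what is proved, stated in full; the proofs are below) =====
def Claim_equal_matches_base_symbol_py : Prop := ∀ (oi_symbol : String) (base_symbol : String), Dom_matches_base_symbol_py oi_symbol base_symbol → Spec_matches_base_symbol_py oi_symbol base_symbol (matches_base_symbol_py oi_symbol base_symbol)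

-- ===== LEMMAS AND PROOFS =====

theorem pv_sw_iff (s p : String) : PySem.Str.startswith s p = true ↔ p.toList <+: s.toList := by
  simp [PySem.Chars.startswith_iff]

theorem pv_sw_refl (s : String) : PySem.Str.startswith s s = true := by
  rw [pv_sw_iff]

theorem pv_sw_of_eq {s p : String} (h : (s == p) = true) : PySem.Str.startswith s p = true := by
  rw [beq_iff_eq] at h; subst h; exact pv_sw_refl s

theorem pv_sw_mono {s p q : String} (hpq : p.toList <+: q.toList)
    (h : PySem.Str.startswith s q = true) : PySem.Str.startswith s p = true := by
  rw [pv_sw_iff] at h ⊢; exact hpq.trans h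

theorem pv_sw_append {s p t : String} (h : PySem.Str.startswith s (p ++ t) = true) :
    PySem.Str.startswith s p = true := by
  refine pv_sw_mono ?_ h
  rw [String.toList_append]; exact List.prefix_append _ _

set_option maxHeartbeats 2000000 in
theorem pv_core (u b : String) :
    (if u == b then true
     else
       ([ b ++ "USD", b ++ "USDT", b ++ "USDC",
          b ++ "-USD", b ++ "-USDT", b ++ "-USDC",
          b ++ "_USD", b ++ "_USDT", b ++ "_USDC",
          b ++ "-PERP", b ++ "_PERP", b ++ "PERP",
          if b == "BTC" then "XBT" else b ] : List String).any
         (fun pattern => u == pattern || PySem.Str.startswith u pattern))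
    = (if b != "BTC" then PySem.Str.startswith u b
       else u == "BTC" || pvBtcPrefixes.any (fun p => PySem.Str.startswith u p)) := by
  rw [Bool.eq_iff_iff]
  by_cases hb : b = "BTC"
  · subst hb
    simp only [bne_self_eq_false, Bool.false_eq_true, if_false]
    by_cases hu : u = "BTC"
    · subst hu; simp
    · have hu' : (u == "BTC") = false := by simp [hu]
      rw [show ("BTC" : String) ++ "USD" = "BTCUSD" from by decide,
          show ("BTC" : String) ++ "USDT" = "BTCUSDT" from by decide,
          show ("BTC" : String) ++ "USDC" = "BTCUSDC" from by decide,
          show ("BTC" : String) ++ "-USD" = "BTC-USD" from by decide,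
          show ("BTC" : String) ++ "-USDT" = "BTC-USDT" from by decide,
          show ("BTC" : String) ++ "-USDC" = "BTC-USDC" from by decide,
          show ("BTC" : String) ++ "_USD" = "BTC_USD" from by decide,
          show ("BTC" : String) ++ "_USDT" = "BTC_USDT" from by decide,
          show ("BTC" : String) ++ "_USDC" = "BTC_USDC" from by decide,
          show ("BTC" : String) ++ "-PERP" = "BTC-PERP" from by decide,
          show ("BTC" : String) ++ "_PERP" = "BTC_PERP" from by decide,
          show ("BTC" : String) ++ "PERP" = "BTCPERP" from by decide]
      simp only [hu', Bool.false_eq_true, if_false, beq_self_eq_true, if_true, Bool.false_or,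
        pvBtcPrefixes, List.any_cons, List.any_nil, Bool.or_eq_true, Bool.or_false]
      have m1 := fun h => pv_sw_mono (s := u) (p := "BTCUSD") (q := "BTCUSDT") (by decide) h
      have m2 := fun h => pv_sw_mono (s := u) (p := "BTCUSD") (q := "BTCUSDC") (by decide) h
      have m3 := fun h => pv_sw_mono (s := u) (p := "BTC-USD") (q := "BTC-USDT") (by decide) h
      have m4 := fun h => pv_sw_mono (s := u) (p := "BTC-USD") (q := "BTC-USDC") (by decide) h
      have m5 := fun h => pv_sw_mono (s := u) (p := "BTC_USD") (q := "BTC_USDT") (by decide) h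
      have m6 := fun h => pv_sw_mono (s := u) (p := "BTC_USD") (q := "BTC_USDC") (by decide) h
      have e1 := @pv_sw_of_eq u "BTCUSD"
      have e2 := @pv_sw_of_eq u "BTCUSDT"
      have e3 := @pv_sw_of_eq u "BTCUSDC"
      have e4 := @pv_sw_of_eq u "BTC-USD"
      have e5 := @pv_sw_of_eq u "BTC-USDT"
      have e6 := @pv_sw_of_eq u "BTC-USDC"
      have e7 := @pv_sw_of_eq u "BTC_USD"
      have e8 := @pv_sw_of_eq u "BTC_USDT"
      have e9 := @pv_sw_of_eq u "BTC_USDC"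
      have e10 := @pv_sw_of_eq u "BTC-PERP"
      have e11 := @pv_sw_of_eq u "BTC_PERP"
      have e12 := @pv_sw_of_eq u "BTCPERP"
      have e13 := @pv_sw_of_eq u "XBT"
      constructor
      · rintro ((h|h) | (h|h) | (h|h) | (h|h) | (h|h) | (h|h) | (h|h) | (h|h) | (h|h) | (h|h) | (h|h) | (h|h) | (h|h))
        · exact Or.inl (e1 h)
        · exact Or.inl (h)
        · exact Or.inl (m1 (e2 h))
        · exact Or.inl (m1 (h))
        · exact Or.inl (m2 (e3 h))
        · exact Or.inl (m2 (h))
        · exact Or.inr (Or.inl (e4 h))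
        · exact Or.inr (Or.inl (h))
        · exact Or.inr (Or.inl (m3 (e5 h)))
        · exact Or.inr (Or.inl (m3 (h)))
        · exact Or.inr (Or.inl (m4 (e6 h)))
        · exact Or.inr (Or.inl (m4 (h)))
        · exact Or.inr (Or.inr (Or.inl (e7 h)))
        · exact Or.inr (Or.inr (Or.inl (h)))
        · exact Or.inr (Or.inr (Or.inl (m5 (e8 h))))
        · exact Or.inr (Or.inr (Or.inl (m5 (h))))
        · exact Or.inr (Or.inr (Or.inl (m6 (e9 h))))
        · exact Or.inr (Or.inr (Or.inl (m6 (h))))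
        · exact Or.inr (Or.inr (Or.inr (Or.inl (e10 h))))
        · exact Or.inr (Or.inr (Or.inr (Or.inl (h))))
        · exact Or.inr (Or.inr (Or.inr (Or.inr (Or.inl (e11 h)))))
        · exact Or.inr (Or.inr (Or.inr (Or.inr (Or.inl (h)))))
        · exact Or.inr (Or.inr (Or.inr (Or.inr (Or.inr (Or.inl (e12 h))))))
        · exact Or.inr (Or.inr (Or.inr (Or.inr (Or.inr (Or.inl (h))))))
        · exact Or.inr (Or.inr (Or.inr (Or.inr (Or.inr (Or.inr (e13 h))))))
        · exact Or.inr (Or.inr (Or.inr (Or.inr (Or.inr (Or.inr (h))))))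
      · rintro (h|h|h|h|h|h|h)
        · exact Or.inl (Or.inr h)
        · exact Or.inr (Or.inr (Or.inr (Or.inl (Or.inr h))))
        · exact Or.inr (Or.inr (Or.inr (Or.inr (Or.inr (Or.inr (Or.inl (Or.inr h)))))))
        · exact Or.inr (Or.inr (Or.inr (Or.inr (Or.inr (Or.inr (Or.inr (Or.inr (Or.inr (Or.inl (Or.inr h))))))))))
        · exact Or.inr (Or.inr (Or.inr (Or.inr (Or.inr (Or.inr (Or.inr (Or.inr (Or.inr (Or.inr (Or.inl (Or.inr h)))))))))))
        · exact Or.inr (Or.inr (Or.inr (Or.inr (Or.inr (Or.inr (Or.inr (Or.inr (Or.inr (Or.inr (Or.inr (Or.inl (Or.inr h))))))))))))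
        · exact Or.inr (Or.inr (Or.inr (Or.inr (Or.inr (Or.inr (Or.inr (Or.inr (Or.inr (Or.inr (Or.inr (Or.inr (Or.inr h))))))))))))
  · have hb' : (b == "BTC") = false := by simp [hb]
    simp only [bne, hb', Bool.not_false, if_true]
    by_cases hu : u = b
    · subst hu; simp [PySem.Chars.startswith_iff]
    · have hu' : (u == b) = false := by simp [hu]
      simp only [hu', Bool.false_eq_true, if_false, Bool.false_or,
        List.any_cons, List.any_nil, Bool.or_eq_true, Bool.or_false]
      have a1 := fun h => pv_sw_append (s := u) (p := b) (t := "USD") h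
      have a2 := fun h => pv_sw_append (s := u) (p := b) (t := "USDT") h
      have a3 := fun h => pv_sw_append (s := u) (p := b) (t := "USDC") h
      have a4 := fun h => pv_sw_append (s := u) (p := b) (t := "-USD") h
      have a5 := fun h => pv_sw_append (s := u) (p := b) (t := "-USDT") h
      have a6 := fun h => pv_sw_append (s := u) (p := b) (t := "-USDC") h
      have a7 := fun h => pv_sw_append (s := u) (p := b) (t := "_USD") h
      have a8 := fun h => pv_sw_append (s := u) (p := b) (t := "_USDT") h
      have a9 := fun h => pv_sw_append (s := u) (p := b) (t := "_USDC") h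
      have a10 := fun h => pv_sw_append (s := u) (p := b) (t := "-PERP") h
      have a11 := fun h => pv_sw_append (s := u) (p := b) (t := "_PERP") h
      have a12 := fun h => pv_sw_append (s := u) (p := b) (t := "PERP") h
      have e1 := @pv_sw_of_eq u (b ++ "USD")
      have e2 := @pv_sw_of_eq u (b ++ "USDT")
      have e3 := @pv_sw_of_eq u (b ++ "USDC")
      have e4 := @pv_sw_of_eq u (b ++ "-USD")
      have e5 := @pv_sw_of_eq u (b ++ "-USDT")
      have e6 := @pv_sw_of_eq u (b ++ "-USDC")
      have e7 := @pv_sw_of_eq u (b ++ "_USD")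
      have e8 := @pv_sw_of_eq u (b ++ "_USDT")
      have e9 := @pv_sw_of_eq u (b ++ "_USDC")
      have e10 := @pv_sw_of_eq u (b ++ "-PERP")
      have e11 := @pv_sw_of_eq u (b ++ "_PERP")
      have e12 := @pv_sw_of_eq u (b ++ "PERP")
      constructor
      · rintro ((h|h) | (h|h) | (h|h) | (h|h) | (h|h) | (h|h) | (h|h) | (h|h) | (h|h) | (h|h) | (h|h) | (h|h) | h)
        · exact a1 (e1 h)
        · exact a1 (h)
        · exact a2 (e2 h)
        · exact a2 (h)
        · exact a3 (e3 h)
        · exact a3 (h)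
        · exact a4 (e4 h)
        · exact a4 (h)
        · exact a5 (e5 h)
        · exact a5 (h)
        · exact a6 (e6 h)
        · exact a6 (h)
        · exact a7 (e7 h)
        · exact a7 (h)
        · exact a8 (e8 h)
        · exact a8 (h)
        · exact a9 (e9 h)
        · exact a9 (h)
        · exact a10 (e10 h)
        · exact a10 (h)
        · exact a11 (e11 h)
        · exact a11 (h)
        · exact a12 (e12 h)
        · exact a12 (h)
        · exact h
      · intro h
        exact Or.inr (Or.inr (Or.inr (Or.inr (Or.inr (Or.inr (Or.inr (Or.inr (Or.inr (Or.inr (Or.inr (Or.inr (h))))))))))))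

-- ===== VERDICT (by name: the statement is the Claim_ definition above) =====
theorem matches_base_symbol_py_spec : Claim_equal_matches_base_symbol_py := by
  intro oi base _
  show matches_base_symbol_py oi base = matches_base_symbol_py_alt oi base
  unfold matches_base_symbol_py matches_base_symbol_py_alt
  exact pv_core (PySem.Str.upper oi) (PySem.Str.upper base)
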